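-- pv_equiv track=rewrite | github.com/satish537/RAG-kix | services/supporting_text_v4.py | sort_strings_by_text_occurrence
-- ===== SOURCE A (Python) =====
-- def sort_strings_by_text_occurrence(string_list, text_content):
--     # Remove commas from text content
--     text_content = text_content.replace(",", "")
--     search_text = text_content.lower()
--
--     # Create a dictionary to store string and its position in text
--     positions = {}
--
--     for s in string_list:
--         # Remove commas from the search string
--         s_no_comma = s.replace(",", "")
--         search_string = s_no_comma.lower()
--
--         # Check if string exists in text
--         if search_string in search_text:
--             pos = search_text.index(search_string)
--             positions[s_no_comma] = pos
--
--     # Sort strings based on their position in text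
--     return sorted(positions.keys(), key=lambda x: positions[x])
-- ===== SOURCE B (Python) =====
-- def sort_strings_by_text_occurrence(string_list, text_content):
--     # Single left-to-right sweep over text positions instead of per-string
--     # substring search + sort: emit each (comma-stripped) string the first
--     # time its lowercase form starts at the current position.  Output order
--     # is (first position, first appearance in the list) -- no sort needed.
--     text = text_content.replace(",", "").lower()
--     pending = [(k, k.lower())
--                for k in dict.fromkeys(s.replace(",", "") for s in string_list)]
--     result = []
--     for i in range(len(text) + 1):
--         if not pending:
--             break
--         result += [k for k, kl in pending if text.startswith(kl, i)]
--         pending = [(k, kl) for k, kl in pending if not text.startswith(kl, i)]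
--     return result
-- ===== Notes on version B (the rewrite author's own statement) =====
-- stated objective: alternative
-- what changed: B replaces A's per-string substring search into a positions dict followed by a stable sort with a single left-to-right sweep over text positions that emits each deduplicated comma-stripped string at its first match, so the output comes out already ordered and no positions dict and no sort are needed.
import Mathlib
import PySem

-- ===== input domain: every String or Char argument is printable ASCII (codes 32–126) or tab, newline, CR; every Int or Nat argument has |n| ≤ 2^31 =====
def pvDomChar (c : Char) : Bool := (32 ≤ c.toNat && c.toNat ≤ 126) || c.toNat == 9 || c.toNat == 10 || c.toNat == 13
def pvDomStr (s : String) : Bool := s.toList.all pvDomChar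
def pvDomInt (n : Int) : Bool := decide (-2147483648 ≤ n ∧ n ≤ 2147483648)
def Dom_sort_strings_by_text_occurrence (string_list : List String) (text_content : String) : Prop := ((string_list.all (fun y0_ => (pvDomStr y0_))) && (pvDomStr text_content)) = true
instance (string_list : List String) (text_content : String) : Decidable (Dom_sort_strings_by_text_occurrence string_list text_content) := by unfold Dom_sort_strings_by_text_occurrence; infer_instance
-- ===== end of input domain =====

-- B replaces A's per-string substring search + positions dict + stable sort by a single
-- left-to-right sweep over text positions emitting each string at its first match
-- (objective: alternative algorithm of similar cost; not claimed faster).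

-- ===== PORT A =====
def sort_strings_by_text_occurrence (string_list : List String) (text_content : String) : List String :=
  let text_content' := PySem.Str.replace text_content "," ""
  let search_text := PySem.Str.lower text_content'
  let positions : PySem.Dict String Int :=
    string_list.foldl (fun positions s =>
      let s_no_comma := PySem.Str.replace s "," ""
      let search_string := PySem.Str.lower s_no_comma
      if PySem.Str.isIn search_string search_text then
        -- search_text.index(search_string) under the 'in' guard is find (first index)
        positions.insert s_no_comma (PySem.Str.find search_text search_string)
      else positions) PySem.Dict.empty
  -- key=lambda x: positions[x]; every key is present, so the total-form default is never read
  PySem.List.sorted positions.keys (fun x => positions.getD x 0)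

-- ===== PORT B =====
-- the 'for i in range(len(text)+1): if not pending: break; …' loop of Source B;
-- text.startswith(p, i) with 0 ≤ i ≤ len(text) is exactly startswith on (t.drop i)
def pvScanB (t : List Char) (rng : List Nat) (pending : List (String × String))
    (acc : List String) : List String :=
  match rng with
  | [] => acc
  | i :: rest =>
    if pending = [] then acc
    else
      pvScanB t rest
        (pending.filter (fun p => !(PySem.Chars.startswith (t.drop i) p.2.toList)))
        (acc ++ (pending.filter (fun p => PySem.Chars.startswith (t.drop i) p.2.toList)).map Prod.fst)

def sort_strings_by_text_occurrence_alt (string_list : List String) (text_content : String) : List String :=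
  let t := (PySem.Str.lower (PySem.Str.replace text_content "," "")).toList
  let pending := (PySem.List.dedup (string_list.map (fun s => PySem.Str.replace s "," ""))).map
    (fun k => (k, PySem.Str.lower k))
  pvScanB t (List.range (t.length + 1)) pending []

-- ===== PRECONDITION & SPEC =====
def Spec_sort_strings_by_text_occurrence (string_list : List String) (text_content : String) (out : List String) : Prop := out = sort_strings_by_text_occurrence_alt string_list text_content
instance (string_list : List String) (text_content : String) (out : List String) : Decidable (Spec_sort_strings_by_text_occurrence string_list text_content out) := by unfold Spec_sort_strings_by_text_occurrence; infer_instance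

-- ===== CLAIM (what is proved, stated in full; the proofs are below) =====
def Claim_equal_sort_strings_by_text_occurrence : Prop := ∀ (string_list : List String) (text_content : String), Dom_sort_strings_by_text_occurrence string_list text_content → Spec_sort_strings_by_text_occurrence string_list text_content (sort_strings_by_text_occurrence string_list text_content)

-- ===== LEMMAS AND PROOFS =====

-- the first-occurrence index (or -1) of k's lowercase form in t
def pvF (t : List Char) (k : String) : Int := PySem.Chars.find t (PySem.Chars.lower k.toList)

-- a fold whose body is guarded by a condition on the element folds over the filtered list
theorem pv_foldl_if {α β : Type} (g : β → α → β) (c : α → Bool) (l : List α) (d : β) :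
    l.foldl (fun d s => if c s then g d s else d) d = (l.filter c).foldl g d := by
  induction l generalizing d with
  | nil => rfl
  | cons x xs ih =>
      by_cases hx : c x = true <;> simp [hx, ih]

-- lookup in a fold that inserts a key-determined value
theorem pv_get?_foldl_insert_keyval {ν : Type} (l : List String) (key : String → String)
    (v : String → ν) (d : PySem.Dict String ν) (k : String) :
    (l.foldl (fun d s => d.insert (key s) (v (key s))) d).get? k =
      if k ∈ l.map key then some (v k) else d.get? k := by
  induction l generalizing d with
  | nil => simp
  | cons x xs ih =>
      simp only [List.foldl_cons, ih, List.map_cons, List.mem_cons]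
      by_cases hk : k = key x
      · simp [hk, PySem.Dict.get?_insert_self]
      · by_cases hmem : k ∈ xs.map key
        · simp [hmem, hk]
        · simp [hmem, hk, PySem.Dict.get?_insert_of_ne _ _ hk]

-- dedup commutes with filter
theorem pv_ofList_filter {α : Type} [BEq α] [LawfulBEq α] (l : List α) (p : α → Bool) :
    PySem.Set.ofList (l.filter p) = (PySem.Set.ofList l).filter p := by
  induction l using List.reverseRecOn with
  | nil => rfl
  | append_singleton xs x ih =>
      have hof : ∀ (m : List α) (y : α),
          PySem.Set.ofList (m ++ [y]) = PySem.Set.add (PySem.Set.ofList m) y := by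
        intro m y; simp [PySem.Set.ofList, List.foldl_append]
      rw [hof]
      by_cases hp : p x = true
      · have hfx : (xs ++ [x]).filter p = xs.filter p ++ [x] := by
          simp [List.filter_append, hp]
        rw [hfx, hof, ih]
        by_cases hmem : x ∈ xs
        · have h1 : PySem.Set.contains ((PySem.Set.ofList xs).filter p) x = true := by
            rw [PySem.Set.contains_iff]
            exact List.mem_filter.mpr ⟨(PySem.Set.mem_ofList xs x).mpr hmem, hp⟩
          have h2 : PySem.Set.contains (PySem.Set.ofList xs) x = true := by
            rw [PySem.Set.contains_iff, PySem.Set.mem_ofList]; exact hmem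
          simp [PySem.Set.add, hmem, hp]
        · have h1 : PySem.Set.contains ((PySem.Set.ofList xs).filter p) x = false := by
            rw [Bool.eq_false_iff, Ne, PySem.Set.contains_iff]
            intro hc
            exact hmem ((PySem.Set.mem_ofList xs x).mp (List.mem_filter.mp hc).1)
          have h2 : PySem.Set.contains (PySem.Set.ofList xs) x = false := by
            rw [Bool.eq_false_iff, Ne, PySem.Set.contains_iff, PySem.Set.mem_ofList]
            exact hmem
          simp [PySem.Set.add, hmem, List.filter_append, hp]
      · have hp' : p x = false := by simpa using hp
        have hfx : (xs ++ [x]).filter p = xs.filter p := by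
          simp [List.filter_append, hp']
        rw [hfx, ih]
        by_cases hmem : x ∈ xs
        · have h2 : PySem.Set.contains (PySem.Set.ofList xs) x = true := by
            rw [PySem.Set.contains_iff, PySem.Set.mem_ofList]; exact hmem
          simp [PySem.Set.add, hmem]
        · have h2 : PySem.Set.contains (PySem.Set.ofList xs) x = false := by
            rw [Bool.eq_false_iff, Ne, PySem.Set.contains_iff, PySem.Set.mem_ofList]
            exact hmem
          simp [PySem.Set.add, hmem, List.filter_append, hp']

-- insertBy walks past a block it does not insert into
theorem pv_insertBy_append_not_before {α : Type} (before : α → α → Bool) (x : α)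
    (l r : List α) (h : ∀ y ∈ l, before x y = false) :
    PySem.List.insertBy before x (l ++ r) = l ++ PySem.List.insertBy before x r := by
  induction l with
  | nil => simp
  | cons y ys ih =>
      have hy : before x y = false := h y (by simp)
      simp only [List.cons_append, PySem.List.insertBy, hy, Bool.false_eq_true, if_false]
      rw [ih (fun z hz => h z (by simp [hz]))]

-- insertBy puts x in front of a block it precedes entirely
theorem pv_insertBy_all_before {α : Type} (before : α → α → Bool) (x : α)
    (l : List α) (h : ∀ y ∈ l, before x y = true) :
    PySem.List.insertBy before x l = x :: l := by
  cases l with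
  | nil => rfl
  | cons y ys => simp [PySem.List.insertBy, h y (by simp)]

-- inserting into a concatenation of key-homogeneous buckets with strictly increasing
-- key values appends x at the end of its own bucket
theorem pv_insertBy_buckets {α : Type} (g : α → Int) (x : α) (is : List Nat)
    (B : Nat → List α) (hB : ∀ i ∈ is, ∀ y ∈ B i, g y = (i : Int))
    (hmono : is.Pairwise (· < ·)) (hx : ∃ j ∈ is, (j : Int) = g x) :
    PySem.List.insertBy (fun a b => decide (g a < g b)) x (is.flatMap B) =
      is.flatMap (fun (i : Nat) => if (i : Int) = g x then B i ++ [x] else B i) := by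
  induction is with
  | nil => obtain ⟨j, hj, _⟩ := hx; exact absurd hj (by simp)
  | cons i rest ih =>
      have hmono' := (List.pairwise_cons.mp hmono).2
      have hlt := (List.pairwise_cons.mp hmono).1
      by_cases hi : (i : Int) = g x
      · -- x belongs to bucket i: skip B i, then insert before everything after
        have hskip : ∀ y ∈ B i, (fun a b => decide (g a < g b)) x y = false := by
          intro y hy
          have := hB i (by simp) y hy
          simp only [decide_eq_false_iff_not, this, ← hi]
          omega
        have hall : ∀ y ∈ rest.flatMap B, (fun a b => decide (g a < g b)) x y = true := by
          intro y hy
          obtain ⟨j, hj, hyj⟩ := List.mem_flatMap.mp hy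
          have := hB j (by simp [hj]) y hyj
          have hij : i < j := hlt j hj
          simp only [decide_eq_true_eq, this, ← hi]
          exact_mod_cast hij
        rw [List.flatMap_cons, pv_insertBy_append_not_before _ _ _ _ hskip,
            pv_insertBy_all_before _ _ _ hall]
        have hrest : rest.flatMap (fun (j : Nat) => if (j : Int) = g x then B j ++ [x] else B j)
            = rest.flatMap B := by
          apply List.flatMap_congr
          intro j hj
          have hij : i < j := hlt j hj
          have : (j : Int) ≠ g x := by rw [← hi]; exact_mod_cast Nat.ne_of_gt hij
          simp [this]
        simp [List.flatMap_cons, hi, hrest]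
      · -- x belongs to a later bucket: skip B i entirely
        obtain ⟨j, hj, hjx⟩ := hx
        have hj' : j ∈ rest := by
          rcases List.mem_cons.mp hj with h | h
          · exact absurd (h ▸ hjx) hi
          · exact h
        have hskip : ∀ y ∈ B i, (fun a b => decide (g a < g b)) x y = false := by
          intro y hy
          have hgy := hB i (by simp) y hy
          have hij : i < j := hlt j hj'
          have : (i : Int) < g x := by rw [← hjx]; exact_mod_cast hij
          simp only [decide_eq_false_iff_not, hgy]
          omega
        rw [List.flatMap_cons, pv_insertBy_append_not_before _ _ _ _ hskip,
            ih (fun j hjm y hy => hB j (by simp [hjm]) y hy) hmono' ⟨j, hj', hjx⟩]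
        simp [List.flatMap_cons, hi]

-- Python's stable sort by an Int key with values in [0, n] is bucket concatenation
theorem pv_sorted_bucket {α : Type} (xs : List α) (g : α → Int) (n : Nat)
    (h : ∀ x ∈ xs, 0 ≤ g x ∧ g x ≤ (n : Int)) :
    PySem.List.sorted xs g =
      (List.range (n + 1)).flatMap (fun (i : Nat) => xs.filter (fun x => g x == (i : Int))) := by
  rw [PySem.List.sorted_eq_foldl_insertBy]
  induction xs using List.reverseRecOn with
  | nil => simp
  | append_singleton ys x ih =>
      have hys : ∀ y ∈ ys, 0 ≤ g y ∧ g y ≤ (n : Int) := fun y hy => h y (by simp [hy])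
      have hx := h x (by simp)
      rw [List.foldl_append, List.foldl_cons, List.foldl_nil, ih hys]
      have hxmem : ∃ j ∈ List.range (n + 1), (j : Int) = g x := by
        refine ⟨(g x).toNat, ?_, ?_⟩
        · rw [List.mem_range]; omega
        · omega
      rw [pv_insertBy_buckets g x _ _ ?_ List.pairwise_lt_range hxmem]
      · apply List.flatMap_congr
        intro i hi
        by_cases hgi : (i : Int) = g x
        · simp [List.filter_append, hgi]
        · have : ¬ (g x == (i : Int)) = true := by simp [beq_iff_eq]; omega
          simp [List.filter_append, hgi]
          omega
      · intro i _ y hy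
        exact beq_iff_eq.mp (List.mem_filter.mp hy).2

-- for a string with no match before position a, matching at a means find = a
theorem pv_startswith_iff_find (t : List Char) (a : Nat) (k : String)
    (hpend : ¬ (0 ≤ pvF t k ∧ pvF t k < (a : Int))) :
    PySem.Chars.startswith (t.drop a) (PySem.Chars.lower k.toList) = (pvF t k == (a : Int)) := by
  by_cases hsw : PySem.Chars.startswith (t.drop a) (PySem.Chars.lower k.toList) = true
  · have hpre : PySem.Chars.lower k.toList <+: t.drop a :=
      (PySem.Chars.startswith_iff _ _).mp hsw
    have hisin : PySem.Chars.isIn (PySem.Chars.lower k.toList) t = true :=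
      (PySem.Chars.exists_prefix_drop_iff_isIn _ _).mp ⟨a, hpre⟩
    have hnn : 0 ≤ pvF t k := by
      rw [pvF, PySem.Chars.find_nonneg_iff]
      exact (PySem.Chars.isIn_iff_infix _ _).mp hisin
    obtain ⟨hfpre, hmin⟩ := PySem.Chars.find_spec hnn
    have hge : (a : Int) ≤ pvF t k := by
      by_contra hcon
      exact hpend ⟨hnn, by omega⟩
    have hle : pvF t k ≤ (a : Int) := by
      by_contra hcon
      exact hmin a (by rw [pvF] at *; omega) hpre
    rw [hsw]
    symm; rw [beq_iff_eq]; omega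
  · have hsw' : PySem.Chars.startswith (t.drop a) (PySem.Chars.lower k.toList) = false := by
      simpa using hsw
    rw [hsw']
    symm; rw [beq_eq_false_iff_ne]
    intro hcon
    have hnn : 0 ≤ pvF t k := by rw [hcon]; exact_mod_cast Nat.zero_le a
    obtain ⟨hfpre, _⟩ := PySem.Chars.find_spec (by rw [pvF] at *; exact hnn)
    apply hsw
    rw [PySem.Chars.startswith_iff]
    have : (pvF t k).toNat = a := by omega
    rw [pvF] at this
    rw [← this]
    exact hfpre

-- the sweep emits, in position order, the pending strings bucketed by first match
theorem pv_pvScanB_range' (t : List Char) (m a : Nat) (P acc : List String)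
    (hpend : ∀ k ∈ P, ¬ (0 ≤ pvF t k ∧ pvF t k < (a : Int))) :
    pvScanB t (List.range' a m) (P.map (fun k => (k, PySem.Str.lower k))) acc =
      acc ++ (List.range' a m).flatMap
        (fun (i : Nat) => P.filter (fun k => pvF t k == (i : Int))) := by
  induction m generalizing a P acc with
  | zero => simp [pvScanB]
  | succ m ih =>
      rw [List.range'_succ]
      by_cases hnil : P = []
      · subst hnil; simp [pvScanB]
      · have hne : P.map (fun k => (k, PySem.Str.lower k)) ≠ [] := by simp [hnil]
        rw [pvScanB, if_neg hne]
        have hsw : ∀ k ∈ P,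
            (PySem.Chars.startswith (t.drop a) (PySem.Str.lower k).toList) =
              (pvF t k == (a : Int)) := by
          intro k hk
          rw [PySem.Str.toList_lower]
          exact pv_startswith_iff_find t a k (hpend k hk)
        have hmatch : (P.map (fun k => (k, PySem.Str.lower k))).filter
            (fun p => PySem.Chars.startswith (t.drop a) p.2.toList) =
            (P.filter (fun k => pvF t k == (a : Int))).map
              (fun k => (k, PySem.Str.lower k)) := by
          rw [List.filter_map]
          exact congrArg _ (List.filter_congr (fun k hk => hsw k hk))
        have hstill : (P.map (fun k => (k, PySem.Str.lower k))).filter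
            (fun p => !(PySem.Chars.startswith (t.drop a) p.2.toList)) =
            (P.filter (fun k => !(pvF t k == (a : Int)))).map
              (fun k => (k, PySem.Str.lower k)) := by
          rw [List.filter_map]
          exact congrArg _ (List.filter_congr (fun k hk => by
            simp only [Function.comp_apply, hsw k hk]))
        rw [hmatch, hstill, List.map_map]
        have hfst : (P.filter (fun k => pvF t k == (a : Int))).map
            (Prod.fst ∘ fun k => (k, PySem.Str.lower k)) =
            P.filter (fun k => pvF t k == (a : Int)) := List.map_id'' (fun _ => rfl) _
        rw [hfst]
        rw [ih (a + 1) _ _ ?_]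
        · have hbucket : ∀ i ∈ List.range' (a + 1) m,
              (P.filter (fun k => !(pvF t k == (a : Int)))).filter
                (fun k => pvF t k == (i : Int)) =
              P.filter (fun k => pvF t k == (i : Int)) := by
            intro i hi
            have hia : a < i := (List.mem_range'_1.mp hi).1
            rw [List.filter_filter]
            apply List.filter_congr
            intro k hk
            by_cases hki : pvF t k = (i : Int)
            · simp [hki]
              omega
            · simp [hki]
          rw [List.flatMap_cons]
          have : (List.range' (a + 1) m).flatMap
              (fun (i : Nat) => (P.filter (fun k => !(pvF t k == (a : Int)))).filter
                (fun k => pvF t k == (i : Int))) =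
              (List.range' (a + 1) m).flatMap
              (fun (i : Nat) => P.filter (fun k => pvF t k == (i : Int))) :=
            List.flatMap_congr hbucket
          rw [this, List.append_assoc]
        · intro k hk
          have hk' := List.mem_filter.mp hk
          have h1 := hpend k hk'.1
          have h2 := hk'.2
          simp only [Bool.not_eq_eq_eq_not, Bool.not_true, beq_eq_false_iff_ne] at h2
          push_cast
          intro hcon
          rcases hcon with ⟨hnn, hlt⟩
          rcases lt_or_ge (pvF t k) (a : Int) with h | h
          · exact h1 ⟨hnn, h⟩
          · have : pvF t k = (a : Int) := by omega
            exact h2 this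

-- A's guarded fold is the unguarded fold over the filtered list
theorem pv_foldA (sl : List String) (st : String) :
    sl.foldl (fun d s =>
        if PySem.Str.isIn (PySem.Str.lower (PySem.Str.replace s "," "")) st then
          d.insert (PySem.Str.replace s "," "")
            (PySem.Str.find st (PySem.Str.lower (PySem.Str.replace s "," "")))
        else d) (PySem.Dict.empty : PySem.Dict String Int) =
      (sl.filter (fun s => PySem.Str.isIn (PySem.Str.lower (PySem.Str.replace s "," "")) st)).foldl
        (fun d s => d.insert (PySem.Str.replace s "," "")
          (PySem.Str.find st (PySem.Str.lower (PySem.Str.replace s "," "")))) PySem.Dict.empty :=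
  pv_foldl_if _ _ sl _

-- the Str-level first-occurrence value is pvF on toList
theorem pv_v_eq_pvF (st : String) (k : String) :
    PySem.Str.find st (PySem.Str.lower k) = pvF st.toList k := by
  simp [pvF, PySem.Str.find_eq, PySem.Str.toList_lower]

theorem pv_occ_iff (st : String) (k : String) :
    PySem.Str.isIn (PySem.Str.lower k) st = true ↔ 0 ≤ pvF st.toList k := by
  rw [PySem.Str.isIn_eq, PySem.Str.toList_lower, pvF, PySem.Chars.find_nonneg_iff,
    PySem.Chars.isIn_iff_infix]

-- the two ports agree for any search text st (A receives st already comma-stripped + lowered)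
theorem pv_main (sl : List String) (st : String) :
    PySem.List.sorted
      ((sl.foldl (fun d s =>
          if PySem.Str.isIn (PySem.Str.lower (PySem.Str.replace s "," "")) st then
            d.insert (PySem.Str.replace s "," "")
              (PySem.Str.find st (PySem.Str.lower (PySem.Str.replace s "," "")))
          else d) (PySem.Dict.empty : PySem.Dict String Int))).keys
      (fun x => ((sl.foldl (fun d s =>
          if PySem.Str.isIn (PySem.Str.lower (PySem.Str.replace s "," "")) st then
            d.insert (PySem.Str.replace s "," "")
              (PySem.Str.find st (PySem.Str.lower (PySem.Str.replace s "," "")))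
          else d) (PySem.Dict.empty : PySem.Dict String Int))).getD x 0) =
    pvScanB st.toList (List.range (st.toList.length + 1))
      ((PySem.List.dedup (sl.map (fun s => PySem.Str.replace s "," ""))).map
        (fun k => (k, PySem.Str.lower k))) [] := by
  rw [pv_foldA]
  set t := st.toList with ht
  set c : String → Bool :=
    fun s => PySem.Str.isIn (PySem.Str.lower (PySem.Str.replace s "," "")) st with hc
  set D : PySem.Dict String Int :=
    (sl.filter c).foldl
      (fun d s => d.insert (PySem.Str.replace s "," "")
        (PySem.Str.find st (PySem.Str.lower (PySem.Str.replace s "," "")))) PySem.Dict.empty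
    with hD
  have hkeys : D.keys = PySem.Set.ofList ((sl.filter c).map (fun s => PySem.Str.replace s "," "")) := by
    rw [hD]
    exact PySem.Dict.keys_foldl_insert_key (sl.filter c) (fun s => PySem.Str.replace s "," "")
      (fun d s => PySem.Str.find st (PySem.Str.lower (PySem.Str.replace s "," ""))) PySem.Dict.empty
  have hget : ∀ k, D.get? k =
      if k ∈ (sl.filter c).map (fun s => PySem.Str.replace s "," "") then
        some (PySem.Str.find st (PySem.Str.lower k)) else none := by
    intro k
    rw [hD, pv_get?_foldl_insert_keyval (sl.filter c) (fun s => PySem.Str.replace s "," "")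
      (fun k => PySem.Str.find st (PySem.Str.lower k)) PySem.Dict.empty k, PySem.Dict.get?_empty]
  have hgetD : ∀ k, k ∈ D.keys → D.getD k 0 = pvF t k := by
    intro k hk
    rw [hkeys, PySem.Set.mem_ofList] at hk
    have := hget k
    rw [if_pos hk] at this
    rw [PySem.Dict.getD, this, Option.getD_some, pv_v_eq_pvF]
  -- the members of the dict are exactly the deduplicated keys whose form occurs
  have hMf : (sl.filter c).map (fun s => PySem.Str.replace s "," "") =
      (sl.map (fun s => PySem.Str.replace s "," "")).filter
        (fun k => PySem.Str.isIn (PySem.Str.lower k) st) := by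
    rw [List.filter_map]
    rfl
  have hbound : ∀ k ∈ D.keys, 0 ≤ D.getD k 0 ∧ D.getD k 0 ≤ (t.length : Int) := by
    intro k hk
    rw [hgetD k hk]
    have hk' := hk
    rw [hkeys, PySem.Set.mem_ofList, hMf] at hk'
    have hocc := (List.mem_filter.mp hk').2
    refine ⟨(pv_occ_iff st k).mp hocc, ?_⟩
    rw [pvF]
    exact PySem.Chars.find_le_length t (PySem.Chars.lower k.toList)
  rw [pv_sorted_bucket D.keys (fun x => D.getD x 0) t.length hbound]
  -- B side: unfold the sweep into the same buckets
  rw [List.range_eq_range',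
    pv_pvScanB_range' t (t.length + 1) 0
      (PySem.List.dedup (sl.map (fun s => PySem.Str.replace s "," ""))) []
      (by intro k _; push_cast; omega),
    List.nil_append, ← List.range_eq_range']
  -- bucket by bucket
  apply List.flatMap_congr
  intro i _
  have h1 : D.keys.filter (fun x => D.getD x 0 == (i : Int)) =
      D.keys.filter (fun x => pvF t x == (i : Int)) :=
    List.filter_congr (fun k hk => by rw [hgetD k hk])
  rw [h1, hkeys, hMf, pv_ofList_filter]
  rw [List.filter_filter]
  apply List.filter_congr
  intro k _
  by_cases hki : pvF t k = (i : Int)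
  · have hocc : PySem.Str.isIn (PySem.Str.lower k) st = true := by
      rw [pv_occ_iff, hki]
      exact_mod_cast Int.natCast_nonneg i
    rw [PySem.Str.isIn_eq, PySem.Str.toList_lower] at hocc
    simp [hki, hocc]
  · simp [hki]

-- ===== VERDICT (by name: the statement is the Claim_ definition above) =====
theorem sort_strings_by_text_occurrence_spec : Claim_equal_sort_strings_by_text_occurrence := by
  intro string_list text_content _
  show sort_strings_by_text_occurrence string_list text_content =
    sort_strings_by_text_occurrence_alt string_list text_content
  exact pv_main string_list (PySem.Str.lower (PySem.Str.replace text_content "," ""))
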